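-- pv_equiv track=rewrite | github.com/phd-course-ml-co-2021/phd-ml-co-2021-01 | notebooks/util/er.py | flow_to_levels
-- ===== SOURCE A (Python) =====
-- def flow_to_levels(fstring):
--     # Parse all the activity names
--     activities = fstring[1:-1].split(',')
--     # Partition into levels
--     levels = [[]]
--     for a in activities:
--         if a == 'triage':
--             pass
--         elif a == 'visit':
--             if len(levels[-1]) == 0:
--                 levels[-1].append(a)
--             else:
--                 levels.append([a])
--             levels.append([])
--         else:
--             levels[-1].append(a)
--     return levels[:-1]
-- ===== SOURCE B (Python) =====
-- def flow_to_levels(fstring):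
--     def levels(acts):
--         # recursively split at the first 'visit'; no visit => nothing more is emitted,
--         # so activities after the last visit are naturally dropped
--         if 'visit' not in acts:
--             return []
--         i = acts.index('visit')
--         head = [a for a in acts[:i] if a != 'triage']
--         return ([head] if head else []) + [['visit']] + levels(acts[i + 1:])
--     return levels(fstring[1:-1].split(','))
-- ===== Notes on version B (the rewrite author's own statement) =====
-- stated objective: alternative
-- what changed: B is a recursive divide-at-separator parser: it finds the index of the first 'visit' with list.index, slices the level out of the prefix (filtering 'triage' in one comprehension) and recurses on the suffix, so the trailing post-last-visit group is never produced at all; A instead streams the tokens once, mutating a trailing empty level used as a buffer and chopping it with [:-1].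
import Mathlib
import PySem

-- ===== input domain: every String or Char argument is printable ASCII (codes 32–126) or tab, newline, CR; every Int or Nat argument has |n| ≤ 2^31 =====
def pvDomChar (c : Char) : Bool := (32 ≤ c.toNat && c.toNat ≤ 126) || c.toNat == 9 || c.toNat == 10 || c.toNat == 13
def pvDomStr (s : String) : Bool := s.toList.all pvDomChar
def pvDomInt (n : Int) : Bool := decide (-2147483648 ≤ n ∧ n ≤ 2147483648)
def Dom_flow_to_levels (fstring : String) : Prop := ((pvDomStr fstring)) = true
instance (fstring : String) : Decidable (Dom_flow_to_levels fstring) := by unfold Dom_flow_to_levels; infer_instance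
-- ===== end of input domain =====

-- B re-parses recursively: split at the first 'visit' (list.index + slices, triage filtered by a
-- comprehension) and recurse on the suffix, instead of A's single streaming pass over a mutable
-- trailing buffer chopped with [:-1]; equal cost, a genuinely different decomposition.


-- ===== PORT A =====
-- one iteration of A's loop; levels[-1] is getLastD (levels is never empty)
def flowA_step (levels : List (List String)) (a : String) : List (List String) :=
  if a = "triage" then levels
  else if a = "visit" then
    (if (levels.getLastD []).length = 0 then
      levels.dropLast ++ [(levels.getLastD []) ++ [a]]
    else
      levels ++ [[a]]) ++ [[]]
  else levels.dropLast ++ [(levels.getLastD []) ++ [a]]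

def flow_to_levels (fstring : String) : List (List String) :=
  -- fstring[1:-1].split(','): separator is the nonempty literal ",", so split? is some
  let activities := (PySem.Str.split? (PySem.Str.slice fstring (some 1) (some (-1))) ",").getD []
  (activities.foldl flowA_step [[]]).dropLast

-- ===== PORT B =====
-- B's inner recursive helper `levels`: split at the first 'visit', recurse on the suffix
def flowB_levels (acts : List String) : List (List String) :=
  match h : PySem.List.index? acts "visit" with
  | none => []
  | some i =>
    let head := (PySem.List.slice acts none (some (i : Int))).filter (fun a => a != "triage")
    (if head = [] then [] else [head]) ++ [["visit"]] ++
      flowB_levels (PySem.List.slice acts (some ((i : Int) + 1)) none)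
termination_by acts.length
decreasing_by
  obtain ⟨hk, -, -⟩ := PySem.List.getElem_of_index?_eq_some h
  have : ((i : Int) + 1) = ((i + 1 : Nat) : Int) := by push_cast; ring
  rw [this, PySem.List.slice_from_natCast]
  simp [List.length_drop]
  omega

def flow_to_levels_alt (fstring : String) : List (List String) :=
  flowB_levels ((PySem.Str.split? (PySem.Str.slice fstring (some 1) (some (-1))) ",").getD [])

-- ===== PRECONDITION & SPEC =====
def Spec_flow_to_levels (fstring : String) (out : List (List String)) : Prop := out = flow_to_levels_alt fstring
instance (fstring : String) (out : List (List String)) : Decidable (Spec_flow_to_levels fstring out) := by unfold Spec_flow_to_levels; infer_instance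

-- ===== CLAIM =====
def Claim_equal_flow_to_levels : Prop := ∀ (fstring : String), Dom_flow_to_levels fstring → Spec_flow_to_levels fstring (flow_to_levels fstring)

-- ===== LEMMAS AND PROOFS =====

-- proof-side streaming pair (result, current): intermediate between A's buffer trick and B's recursion
def pairStep (st : List (List String) × List String) (a : String) :
    List (List String) × List String :=
  if a = "triage" then st
  else if a = "visit" then
    ((if st.2 = [] then st.1 else st.1 ++ [st.2]) ++ [["visit"]], [])
  else (st.1, st.2 ++ [a])

-- proof-side structural spec of B's recursion, with the pending current group as a parameter
def flowBgen (acts : List String) (c : List String) : List (List String) :=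
  match acts with
  | [] => []
  | a :: as =>
    if a = "triage" then flowBgen as c
    else if a = "visit" then (if c = [] then [] else [c]) ++ [["visit"]] ++ flowBgen as []
    else flowBgen as (c ++ [a])

-- Invariant 1: A's levels list is exactly the pair state's result with its current group appended.
theorem flowA_pair_inv (acts : List String) (r : List (List String)) (c : List String) :
    acts.foldl flowA_step (r ++ [c]) =
      (acts.foldl pairStep (r, c)).1 ++ [(acts.foldl pairStep (r, c)).2] := by
  induction acts generalizing r c with
  | nil => simp
  | cons a acts ih =>
    simp only [List.foldl_cons]
    by_cases h1 : a = "triage"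
    · simpa [flowA_step, pairStep, h1] using ih r c
    · by_cases h2 : a = "visit"
      · by_cases h3 : c = []
        · have hA : flowA_step (r ++ [c]) a = (r ++ [["visit"]]) ++ [[]] := by
            simp [flowA_step, h2, h3]
          have hB : pairStep (r, c) a = (r ++ [["visit"]], []) := by
            simp [pairStep, h2, h3]
          rw [hA, hB]; exact ih _ _
        · have hA : flowA_step (r ++ [c]) a = ((r ++ [c]) ++ [["visit"]]) ++ [[]] := by
            simp [flowA_step, h2, List.length_eq_zero_iff, h3]
          have hB : pairStep (r, c) a = ((r ++ [c]) ++ [["visit"]], []) := by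
            simp [pairStep, h2, h3]
          rw [hA, hB]; exact ih _ _
      · have hA : flowA_step (r ++ [c]) a = r ++ [c ++ [a]] := by
          simp [flowA_step, h1, h2]
        have hB : pairStep (r, c) a = (r, c ++ [a]) := by
          simp [pairStep, h1, h2]
        rw [hA, hB]; exact ih _ _

-- Invariant 2: the pair fold's result component is r followed by the structural spec.
theorem pair_flowBgen (acts : List String) (r : List (List String)) (c : List String) :
    (acts.foldl pairStep (r, c)).1 = r ++ flowBgen acts c := by
  induction acts generalizing r c with
  | nil => simp [flowBgen]
  | cons a acts ih =>
    simp only [List.foldl_cons, flowBgen]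
    by_cases h1 : a = "triage"
    · simp only [pairStep, h1]; exact ih r c
    · by_cases h2 : a = "visit"
      · by_cases h3 : c = []
        · have hB : pairStep (r, c) a = (r ++ [["visit"]], []) := by simp [pairStep, h2, h3]
          rw [hB, ih]; simp [h2, h3]
        · have hB : pairStep (r, c) a = ((r ++ [c]) ++ [["visit"]], []) := by
            simp [pairStep, h2, h3]
          rw [hB, ih]; simp [h2, h3]
      · have hB : pairStep (r, c) a = (r, c ++ [a]) := by simp [pairStep, h1, h2]
        rw [hB, ih]; simp [h1, h2]

-- no 'visit' in acts means the structural spec emits nothing (B drops the trailing group)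
theorem flowBgen_no_visit (acts : List String) (c : List String) (h : "visit" ∉ acts) :
    flowBgen acts c = [] := by
  induction acts generalizing c with
  | nil => rfl
  | cons a acts ih =>
    simp only [List.mem_cons, not_or] at h
    have ha : a ≠ "visit" := fun hv => h.1 hv.symm
    simp only [flowBgen, if_neg ha]
    by_cases h1 : a = "triage"
    · simp only [if_pos h1]; exact ih c h.2
    · simp only [if_neg h1]; exact ih _ h.2

-- the structural spec at a decomposition pre ++ 'visit' :: suf with no 'visit' in pre
theorem flowBgen_split (pre suf : List String) (c : List String) (h : "visit" ∉ pre) :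
    flowBgen (pre ++ "visit" :: suf) c =
      (if c ++ pre.filter (fun a => a != "triage") = [] then []
       else [c ++ pre.filter (fun a => a != "triage")]) ++ [["visit"]] ++ flowBgen suf [] := by
  induction pre generalizing c with
  | nil => simp [flowBgen]
  | cons p pre ih =>
    simp only [List.mem_cons, not_or] at h
    have hp : p ≠ "visit" := fun hv => h.1 hv.symm
    by_cases h1 : p = "triage"
    · simp only [List.cons_append, flowBgen, if_pos h1]
      rw [ih c h.2]
      simp [List.filter, h1]
    · simp only [List.cons_append, flowBgen, if_neg h1, if_neg hp]
      rw [ih (c ++ [p]) h.2]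
      simp [h1, List.append_assoc]

-- B's port equals the structural spec started with an empty pending group
theorem flowB_levels_eq_gen (acts : List String) :
    flowB_levels acts = flowBgen acts [] := by
  induction hn : acts.length using Nat.strong_induction_on generalizing acts with
  | _ n ih =>
  subst hn
  rw [flowB_levels]
  split
  next h =>
    have hv : "visit" ∉ acts := (PySem.List.index?_eq_none_iff _ _).mp h
    simp [flowBgen_no_visit acts [] hv]
  next i h =>
    obtain ⟨pre, suf, hacts, hlen, hpre⟩ := (PySem.List.index?_eq_some_iff _ _ _).mp h
    have htake : PySem.List.slice acts none (some (i : Int)) = pre := by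
      rw [PySem.List.slice_to_natCast, hacts, ← hlen, List.take_left]
    have hdrop : PySem.List.slice acts (some ((i : Int) + 1)) none = suf := by
      have : ((i : Int) + 1) = ((i + 1 : Nat) : Int) := by push_cast; ring
      rw [this, PySem.List.slice_from_natCast, hacts, ← hlen]
      have : pre ++ "visit" :: suf = (pre ++ ["visit"]) ++ suf := by simp
      rw [this]
      have hl : pre.length + 1 = (pre ++ ["visit"]).length := by simp
      rw [hl, List.drop_left]
    rw [htake, hdrop]
    have hsuf : flowB_levels suf = flowBgen suf [] := by
      apply ih suf.length _ suf rfl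
      have : acts.length = pre.length + 1 + suf.length := by simp [hacts]; omega
      omega
    rw [hsuf, hacts, flowBgen_split pre suf [] hpre]
    simp

-- ===== VERDICT =====
theorem flow_to_levels_spec : Claim_equal_flow_to_levels := by
  intro fstring _
  unfold Spec_flow_to_levels flow_to_levels flow_to_levels_alt
  have h := flowA_pair_inv
    ((PySem.Str.split? (PySem.Str.slice fstring (some 1) (some (-1))) ",").getD []) [] []
  simp only [List.nil_append] at h
  simp only []
  rw [h, List.dropLast_concat, pair_flowBgen, flowB_levels_eq_gen, List.nil_append]
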